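-- pv_equiv track=rewrite | github.com/tedib04/I-DIDD | processor/src/automata/constraint_automaton.py | get_prefix
-- ===== SOURCE A (Python) =====
-- import copy
-- from typing import Set, Dict, List, Tuple
--
-- def get_prefix(items: List[str], constraint_activation: str) -> List[str]:
--     indices = [i for i, item in enumerate(items) if item == constraint_activation]
--
--     if len(indices) > 0:
--         start_idx = indices[-1]
--         sliced = copy.deepcopy(items[start_idx:])
--         return sliced
--     else:
--         return items
-- ===== SOURCE B (Python) =====
-- import copy
--
--
-- def get_prefix(items, constraint_activation):
--     # Single forward pass with a reset accumulator: the candidate suffix is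
--     # maintained directly (reset to [item] at each match, extended otherwise),
--     # so no indices are computed and no slicing is performed.
--     found = False
--     suffix = []
--     for item in items:
--         if item == constraint_activation:
--             found = True
--             suffix = [item]
--         else:
--             suffix.append(item)
--     return copy.deepcopy(suffix) if found else items
-- ===== Notes on version B (the rewrite author's own statement) =====
-- stated objective: alternative
-- what changed: Instead of collecting all matching indices and slicing at the last one, B maintains the candidate suffix itself in a single forward pass with an accumulator that is reset at each match, so no index list and no slice operation exist.
import Mathlib
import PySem

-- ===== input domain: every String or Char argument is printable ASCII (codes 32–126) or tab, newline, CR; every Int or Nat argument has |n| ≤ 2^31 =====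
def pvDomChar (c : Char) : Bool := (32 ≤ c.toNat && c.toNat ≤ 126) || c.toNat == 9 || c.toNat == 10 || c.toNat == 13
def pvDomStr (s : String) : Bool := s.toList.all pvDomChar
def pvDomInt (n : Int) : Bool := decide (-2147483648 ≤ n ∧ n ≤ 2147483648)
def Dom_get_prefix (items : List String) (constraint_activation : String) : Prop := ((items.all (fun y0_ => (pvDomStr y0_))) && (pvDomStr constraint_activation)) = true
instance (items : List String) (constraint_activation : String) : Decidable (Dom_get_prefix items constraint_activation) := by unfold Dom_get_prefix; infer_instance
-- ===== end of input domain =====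

-- B maintains the suffix itself in one forward pass with a reset accumulator
-- (no index list, no slice); equivalence is about the return VALUE only
-- (A and B return a deepcopy on a match, `items` itself otherwise).

-- ===== PORT A =====
-- indices = [i for i, item in enumerate(items) if item == constraint_activation]
-- if len(indices) > 0: return deepcopy(items[indices[-1]:]) else: return items
-- (deepcopy of a list of strings is value-identity, so it is dropped)
def get_prefix (items : List String) (constraint_activation : String) : List String :=
  let indices : List Int :=
    ((PySem.List.enumerate items 0).filter (fun p => p.2 == constraint_activation)).map (fun p => p.1)
  if indices.length > 0 then
    PySem.List.slice items (some indices.getLast!) none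
  else
    items

-- ===== PORT B =====
-- the for-loop of Source B over (found, suffix): reset suffix to [item] on a match,
-- append item otherwise (deepcopy of a list of strings is value-identity)
def altLoop (c : String) : List String → Bool → List String → Bool × List String
  | [], found, suffix => (found, suffix)
  | x :: xs, found, suffix =>
    if x == c then altLoop c xs true [x]
    else altLoop c xs found (suffix ++ [x])

def get_prefix_alt (items : List String) (constraint_activation : String) : List String :=
  let r := altLoop constraint_activation items false []
  if r.1 then r.2 else items

-- ===== PRECONDITION & SPEC =====
def Spec_get_prefix (items : List String) (constraint_activation : String) (out : List String) : Prop := out = get_prefix_alt items constraint_activation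
instance (items : List String) (constraint_activation : String) (out : List String) : Decidable (Spec_get_prefix items constraint_activation out) := by unfold Spec_get_prefix; infer_instance

-- ===== CLAIM (what is proved, stated in full; the proofs are below) =====
def Claim_equal_get_prefix : Prop := ∀ (items : List String) (constraint_activation : String), Dom_get_prefix items constraint_activation → Spec_get_prefix items constraint_activation (get_prefix items constraint_activation)

-- ===== LEMMAS AND PROOFS =====

-- index of the last occurrence of c, defined front-recursively
def lastIdx? (c : String) : List String → Option Nat
  | [] => none
  | x :: xs =>
    match lastIdx? c xs with
    | some i => some (i + 1)
    | none => if x == c then some 0 else none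

theorem altLoop_eq (c : String) (l : List String) (found : Bool) (suffix : List String) :
    altLoop c l found suffix =
      match lastIdx? c l with
      | some i => (true, l.drop i)
      | none => (found, suffix ++ l) := by
  induction l generalizing found suffix with
  | nil => simp [altLoop, lastIdx?]
  | cons x xs ih =>
    simp only [altLoop, lastIdx?]
    by_cases hx : x == c
    · rw [if_pos hx, ih]
      cases h : lastIdx? c xs with
      | some i => simp
      | none => simp [hx]
    · rw [if_neg hx, ih]
      cases h : lastIdx? c xs with
      | some i => simp
      | none => simp [hx]

def idxsOf (items : List String) (c : String) : List Int :=
  ((PySem.List.enumerate items 0).filter (fun p => p.2 == c)).map (fun p => p.1)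

theorem lastIdx?_append (c : String) (ys : List String) (x : String) :
    lastIdx? c (ys ++ [x]) = if x == c then some ys.length else lastIdx? c ys := by
  induction ys with
  | nil => simp [lastIdx?]
  | cons y ys ih =>
    simp only [List.cons_append, lastIdx?, ih]
    by_cases hx : x == c
    · simp [hx]
    · simp [hx]

theorem getLast?_idxsOf (items : List String) (c : String) :
    (idxsOf items c).getLast? = (lastIdx? c items).map (fun i => (i : Int)) := by
  induction items using List.reverseRecOn with
  | nil => rfl
  | append_singleton ys x ih =>
    simp only [idxsOf, PySem.List.enumerate_append, List.filter_append, List.map_append,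
      lastIdx?_append]
    by_cases hx : x == c
    · simp [PySem.List.enumerate, hx]
    · simp only [PySem.List.enumerate, List.filter_cons, List.filter_nil]
      rw [if_neg (by simpa using hx)]
      rw [if_neg hx]
      simpa [idxsOf] using ih

-- ===== VERDICT (by name: the statement is the Claim_ definition above) =====
theorem get_prefix_spec : Claim_equal_get_prefix := by
  intro items c _
  unfold Spec_get_prefix get_prefix get_prefix_alt
  rw [altLoop_eq]
  have hlast := getLast?_idxsOf items c
  cases hli : lastIdx? c items with
  | none =>
    rw [hli] at hlast
    have hnil : idxsOf items c = [] := by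
      cases hidx : idxsOf items c with
      | nil => rfl
      | cons a l => rw [hidx] at hlast; simp at hlast
    simp only [idxsOf] at hnil
    simp [hnil]
  | some i =>
    rw [hli] at hlast
    have hne : (idxsOf items c).length > 0 := by
      cases hidx : idxsOf items c with
      | nil => rw [hidx] at hlast; simp at hlast
      | cons a l => simp
    have hlastbang : (idxsOf items c).getLast! = (i : Int) := by
      rw [List.getLast!_eq_getLast?_getD, hlast]; rfl
    simp only [idxsOf] at hne hlastbang
    simp only [hne, if_true, hlastbang]
    exact PySem.List.slice_from_natCast items i
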